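-- pv_equiv track=rewrite | github.com/molly-101/Algorithm | Algorithm_Prepare/Programmers/Procession_Border_Rotation.py | solution
-- ===== SOURCE A (Python) =====
-- def solution(rows, columns, queries):
--     board = [[i for i in range(j * columns + 1, j * columns + columns + 1)] for j in range(0, rows)]
--     answer = []
--
--     for querie in queries:
--         dx, dy = [querie[0] - 1, querie[2] - 1], [querie[1] - 1, querie[3] - 1]
--         before = board[dx[0]][dy[0]]
--         minimum = before
--
--         # upside
--         for i in range(dy[0] + 1, dy[1] + 1):
--             tmp = board[dx[0]][i]
--             board[dx[0]][i] = before
--             before = tmp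
--             minimum = min(minimum, tmp)
--
--         # right side
--         for i in range(dx[0] + 1, dx[1] + 1):
--             tmp = board[i][dy[1]]
--             board[i][dy[1]] = before
--             before = tmp
--             minimum = min(minimum, tmp)
--
--         # bottom side
--         for i in range(dy[1]-1, dy[0] - 1, -1):
--             tmp = board[dx[1]][i]
--             board[dx[1]][i] = before
--             before = tmp
--             minimum = min(minimum, tmp)
--
--         # left side
--         for i in range(dx[1]-1, dx[0] - 1, -1):
--             tmp = board[i][dy[0]]
--             board[i][dy[0]] = before
--             before = tmp
--             minimum = min(minimum, tmp)
--
--         answer.append(minimum)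
--
--     return answer
-- ===== SOURCE B (Python) =====
-- def solution(rows, columns, queries):
--     board = [list(range(j * columns + 1, j * columns + columns + 1)) for j in range(0, rows)]
--     answer = []
--     for q in queries:
--         r1, c1, r2, c2 = q[0] - 1, q[1] - 1, q[2] - 1, q[3] - 1
--         coords = ([(r1, c) for c in range(c1, c2)]
--                   + [(r, c2) for r in range(r1, r2)]
--                   + [(r2, c) for c in range(c2, c1, -1)]
--                   + [(r, c1) for r in range(r2, r1, -1)])
--         vals = [board[r][c] for r, c in coords]
--         answer.append(min(vals))
--         shifted = [vals[-1]] + vals[:-1]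
--         for (r, c), v in zip(coords, shifted):
--             board[r][c] = v
--     return answer
-- ===== Notes on version B (the rewrite author's own statement) =====
-- stated objective: alternative
-- what changed: A rotates each query's border in place with four carry loops threading a 'before' value and a running minimum; B instead collects the border coordinates in clockwise order once, reads all their values, appends min(vals) to the answer, and writes the value list rotated right by one back into the same coordinates.
-- outside the precondition, e.g. on solution(1, 3, [[1, 1, 1, 3], [1, 1, 1, 3]]): A returns [1, 1], B returns [1, 2]; on solution(4, 4, [[0, 2, 1, 1]]): A returns [1], B returns [2]; on solution(3, 4, [[2, 4, 1, 0]]): A returns [8], B raises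
import Mathlib
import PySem

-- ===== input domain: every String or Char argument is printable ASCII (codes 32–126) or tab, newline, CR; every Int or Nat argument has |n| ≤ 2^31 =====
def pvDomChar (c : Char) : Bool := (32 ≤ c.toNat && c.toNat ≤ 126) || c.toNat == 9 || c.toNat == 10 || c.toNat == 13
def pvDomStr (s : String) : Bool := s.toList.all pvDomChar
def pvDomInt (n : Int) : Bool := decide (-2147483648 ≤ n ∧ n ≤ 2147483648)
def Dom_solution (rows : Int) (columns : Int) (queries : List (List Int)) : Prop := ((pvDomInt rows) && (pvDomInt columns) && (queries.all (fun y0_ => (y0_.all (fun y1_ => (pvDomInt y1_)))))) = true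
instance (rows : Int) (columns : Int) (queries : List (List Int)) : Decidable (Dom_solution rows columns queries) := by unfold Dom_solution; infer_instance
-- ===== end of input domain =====

-- B replaces A's four in-place carry loops per query by collecting the border coordinates once,
-- reading their values, taking the minimum, and writing the value list rotated right by one back
-- (objective: alternative decomposition, same asymptotic cost).

-- shared Python primitives: board[r][c] read and write (exact under Pre_, where all indices are in range)
def getCell (bd : List (List Int)) (r c : Int) : Int :=
  PySem.List.pyGetD (PySem.List.pyGetD bd r []) c 0

def setCell (bd : List (List Int)) (r c : Int) (v : Int) : List (List Int) :=
  PySem.List.pySetD bd r (PySem.List.pySetD (PySem.List.pyGetD bd r []) c v)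

-- ===== PORT A =====
-- A's loop body (identical in all four border loops): tmp = board[r][c]; board[r][c] = before; before = tmp; minimum = min(minimum, tmp)
def qstep (t : List (List Int) × Int × Int) (r c : Int) : List (List Int) × Int × Int :=
  let tmp := getCell t.1 r c
  (setCell t.1 r c t.2.1, tmp, min t.2.2 tmp)

def solution (rows : Int) (columns : Int) (queries : List (List Int)) : List Int :=
  let board := (PySem.List.pyRange 0 rows 1).map
    (fun j => PySem.List.pyRange (j * columns + 1) (j * columns + columns + 1) 1)
  (queries.foldl (fun (s : List (List Int) × List Int) querie =>
    let dx0 := PySem.List.pyGetD querie 0 0 - 1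
    let dx1 := PySem.List.pyGetD querie 2 0 - 1
    let dy0 := PySem.List.pyGetD querie 1 0 - 1
    let dy1 := PySem.List.pyGetD querie 3 0 - 1
    let before := getCell s.1 dx0 dy0
    let t0 : List (List Int) × Int × Int := (s.1, before, before)
    let t1 := (PySem.List.pyRange (dy0 + 1) (dy1 + 1) 1).foldl (fun t i => qstep t dx0 i) t0
    let t2 := (PySem.List.pyRange (dx0 + 1) (dx1 + 1) 1).foldl (fun t i => qstep t i dy1) t1
    let t3 := (PySem.List.pyRange (dy1 - 1) (dy0 - 1) (-1)).foldl (fun t i => qstep t dx1 i) t2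
    let t4 := (PySem.List.pyRange (dx1 - 1) (dx0 - 1) (-1)).foldl (fun t i => qstep t i dy0) t3
    (t4.1, s.2 ++ [t4.2.2])) (board, [])).2

-- ===== PORT B =====
def solution_alt (rows : Int) (columns : Int) (queries : List (List Int)) : List Int :=
  let board := (PySem.List.pyRange 0 rows 1).map
    (fun j => PySem.List.pyRange (j * columns + 1) (j * columns + columns + 1) 1)
  (queries.foldl (fun (s : List (List Int) × List Int) q =>
    let r1 := PySem.List.pyGetD q 0 0 - 1
    let c1 := PySem.List.pyGetD q 1 0 - 1
    let r2 := PySem.List.pyGetD q 2 0 - 1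
    let c2 := PySem.List.pyGetD q 3 0 - 1
    let coords := (PySem.List.pyRange c1 c2 1).map (fun c => (r1, c))
      ++ (PySem.List.pyRange r1 r2 1).map (fun r => (r, c2))
      ++ (PySem.List.pyRange c2 c1 (-1)).map (fun c => (r2, c))
      ++ (PySem.List.pyRange r2 r1 (-1)).map (fun r => (r, c1))
    let vals := coords.map (fun p => getCell s.1 p.1 p.2)
    let m := (PySem.List.min? vals (fun x => x)).getD 0      -- min(vals); vals ≠ [] under Pre_
    let shifted := PySem.List.pyGetD vals (-1) 0 :: PySem.List.slice vals none (some (-1))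
    let bd' := (coords.zip shifted).foldl (fun b pv => setCell b pv.1.1 pv.1.2 pv.2) s.1
    (bd', s.2 ++ [m])) (board, [])).2

-- ===== PRECONDITION & SPEC =====
-- Pre_ restricts to the problem's stated domain: each query lists x1 y1 x2 y2 with 1 ≤ x1 < x2 ≤ rows and
-- 1 ≤ y1 < y2 ≤ columns.  Outside it A either raises IndexError, or — for nonpositive indices (Python
-- negative-index wraparound) and for degenerate one-row/one-column rectangles (where A's carry re-reads
-- cells it has already overwritten) — returns values that are artefacts of A's in-place loop, which B's
-- read-all-then-write scheme does not reproduce.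
def Pre_solution (rows : Int) (columns : Int) (queries : List (List Int)) : Prop :=
  ∀ q ∈ queries, 4 ≤ q.length ∧
    1 ≤ q.getD 0 0 ∧ q.getD 0 0 < q.getD 2 0 ∧ q.getD 2 0 ≤ rows ∧
    1 ≤ q.getD 1 0 ∧ q.getD 1 0 < q.getD 3 0 ∧ q.getD 3 0 ≤ columns
instance (rows : Int) (columns : Int) (queries : List (List Int)) : Decidable (Pre_solution rows columns queries) := by unfold Pre_solution; infer_instance

def pvWitness_solution : Int × Int × List (List Int) := (3, 3, [[1, 1, 2, 3], [1, 2, 3, 3]])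

def Spec_solution (rows : Int) (columns : Int) (queries : List (List Int)) (out : List Int) : Prop := out = solution_alt rows columns queries
instance (rows : Int) (columns : Int) (queries : List (List Int)) (out : List Int) : Decidable (Spec_solution rows columns queries out) := by unfold Spec_solution; infer_instance

-- ===== CLAIM (what is proved, stated in full; the proofs are below) =====
def Claim_equal_solution : Prop := ∀ (rows : Int) (columns : Int) (queries : List (List Int)), Dom_solution rows columns queries → Pre_solution rows columns queries → Spec_solution rows columns queries (solution rows columns queries)

-- ===== LEMMAS AND PROOFS =====

-- nat-level forms
lemma getCell_nonneg (bd : List (List Int)) {r c : Int} (hr : 0 ≤ r) (hc : 0 ≤ c) :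
    getCell bd r c = (bd.getD r.toNat []).getD c.toNat 0 := by
  simp [getCell, PySem.List.pyGetD_of_nonneg _ _ hr, PySem.List.pyGetD_of_nonneg _ _ hc, List.getD]

lemma setCell_nonneg (bd : List (List Int)) {r c : Int} (hr : 0 ≤ r) (hc : 0 ≤ c) (v : Int) :
    setCell bd r c v = bd.set r.toNat ((bd.getD r.toNat []).set c.toNat v) := by
  simp [setCell, PySem.List.pySetD_of_nonneg _ _ hr, PySem.List.pySetD_of_nonneg _ _ hc,
    PySem.List.pyGetD_of_nonneg _ _ hr, List.getD]


lemma getD_set_self {α : Type} (l : List α) (i : Nat) (x d : α) :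
    (l.set i x).getD i d = if i < l.length then x else d := by
  simp [List.getD, List.getElem?_set]
  split_ifs <;> simp_all

lemma getD_set_ne {α : Type} (l : List α) {i j : Nat} (h : i ≠ j) (x d : α) :
    (l.set i x).getD j d = l.getD j d := by
  simp [List.getD, List.getElem?_set_ne h]

lemma getCell_setCell_ne (bd : List (List Int)) {r c r' c' : Int} (hr : 0 ≤ r) (hc : 0 ≤ c)
    (hr' : 0 ≤ r') (hc' : 0 ≤ c') (hne : (r, c) ≠ (r', c')) (v : Int) :
    getCell (setCell bd r c v) r' c' = getCell bd r' c' := by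
  rw [getCell_nonneg _ hr' hc', getCell_nonneg _ hr' hc', setCell_nonneg _ hr hc]
  by_cases hrow : r = r'
  · subst hrow
    have hcol : c ≠ c' := by intro h; exact hne (by rw [h])
    have hcc : c.toNat ≠ c'.toNat := by omega
    rw [getD_set_self]
    split_ifs with hlt
    · rw [getD_set_ne _ hcc]
    · have : bd.getD r.toNat [] = [] := by
        rw [List.getD, List.getElem?_eq_none (by omega)]; rfl
      rw [this]
  · have hrr : r.toNat ≠ r'.toNat := by omega
    rw [getD_set_ne _ hrr]

lemma setCell_comm (bd : List (List Int)) {r c r' c' : Int} (hr : 0 ≤ r) (hc : 0 ≤ c)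
    (hr' : 0 ≤ r') (hc' : 0 ≤ c') (hne : (r, c) ≠ (r', c')) (v v' : Int) :
    setCell (setCell bd r c v) r' c' v' = setCell (setCell bd r' c' v') r c v := by
  rw [setCell_nonneg _ hr hc, setCell_nonneg _ hr' hc',
      setCell_nonneg _ hr' hc', setCell_nonneg _ hr hc]
  by_cases hrow : r = r'
  · subst hrow
    have hcol : c ≠ c' := by intro h; exact hne (by rw [h])
    have hcc : c.toNat ≠ c'.toNat := by omega
    rw [getD_set_self, getD_set_self]
    split_ifs with hlt
    · rw [List.set_set, List.set_set, List.set_comm _ _ hcc]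
    · have h1 : bd.set r.toNat ((bd.getD r.toNat []).set c'.toNat v') = bd :=
        List.set_eq_of_length_le (by omega)
      have h2 : bd.set r.toNat ((bd.getD r.toNat []).set c.toNat v) = bd :=
        List.set_eq_of_length_le (by omega)
      rw [h1, h2, List.set_eq_of_length_le (by omega), List.set_eq_of_length_le (by omega)]
  · have hrr : r.toNat ≠ r'.toNat := by omega
    rw [getD_set_ne _ hrr, getD_set_ne _ (Ne.symm hrr), List.set_comm _ _ hrr]

-- proof-side views of the two loop shapes
def carryA (t : List (List Int) × Int × Int) (cs : List (Int × Int)) : List (List Int) × Int × Int :=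
  cs.foldl (fun t p => qstep t p.1 p.2) t

def readsL (bd : List (List Int)) (cs : List (Int × Int)) : List Int :=
  cs.map (fun p => getCell bd p.1 p.2)

def writesL (bd : List (List Int)) (pvs : List ((Int × Int) × Int)) : List (List Int) :=
  pvs.foldl (fun b pv => setCell b pv.1.1 pv.1.2 pv.2) bd

lemma readsL_setCell (bd : List (List Int)) (cs : List (Int × Int)) {p : Int × Int}
    (hp : 0 ≤ p.1 ∧ 0 ≤ p.2) (hcs : ∀ q ∈ cs, 0 ≤ q.1 ∧ 0 ≤ q.2) (hnm : p ∉ cs) (v : Int) :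
    readsL (setCell bd p.1 p.2 v) cs = readsL bd cs := by
  apply List.map_congr_left
  intro q hq
  refine getCell_setCell_ne bd hp.1 hp.2 (hcs q hq).1 (hcs q hq).2 ?_ v
  intro h
  have hpq : p = q := by cases p; cases q; simpa using h
  exact hnm (hpq ▸ hq)

lemma carry_spec (cs : List (Int × Int)) (bd : List (List Int)) (b m : Int)
    (hnd : cs.Nodup) (hnn : ∀ q ∈ cs, 0 ≤ q.1 ∧ 0 ≤ q.2) :
    carryA (bd, b, m) cs = (writesL bd (cs.zip (b :: readsL bd cs)),
      (readsL bd cs).getLastD b, (readsL bd cs).foldl min m) := by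
  induction cs generalizing bd b m with
  | nil => rfl
  | cons p cs ih =>
    have hstep : carryA (bd, b, m) (p :: cs)
        = carryA (setCell bd p.1 p.2 b, getCell bd p.1 p.2, min m (getCell bd p.1 p.2)) cs := by
      simp [carryA, qstep]
    rw [hstep, ih _ _ _ hnd.of_cons (fun q hq => hnn q (List.mem_cons_of_mem _ hq))]
    have hre : readsL (setCell bd p.1 p.2 b) cs = readsL bd cs :=
      readsL_setCell bd cs (hnn p (List.mem_cons_self ..))
        (fun q hq => hnn q (List.mem_cons_of_mem _ hq)) (by exact (List.nodup_cons.mp hnd).1) b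
    rw [hre]
    have hrc : readsL bd (p :: cs) = getCell bd p.1 p.2 :: readsL bd cs := rfl
    simp only [hrc, List.getLastD_cons, List.foldl_cons, List.zip_cons_cons]
    rfl

lemma writesL_setCell_comm (pvs : List ((Int × Int) × Int)) (bd : List (List Int))
    {p : Int × Int} (v : Int) (hp : 0 ≤ p.1 ∧ 0 ≤ p.2)
    (hnn : ∀ q ∈ pvs, 0 ≤ q.1.1 ∧ 0 ≤ q.1.2) (hnm : p ∉ pvs.map (·.1)) :
    writesL (setCell bd p.1 p.2 v) pvs = setCell (writesL bd pvs) p.1 p.2 v := by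
  induction pvs generalizing bd with
  | nil => rfl
  | cons qw pvs ih =>
    have hq := hnn qw (List.mem_cons_self ..)
    have hne : (p.1, p.2) ≠ (qw.1.1, qw.1.2) := by
      intro h
      apply hnm
      have : p = qw.1 := by
        obtain ⟨a, b⟩ := p; obtain ⟨⟨x, y⟩, w⟩ := qw
        simp only [Prod.mk.injEq] at h
        simp [h.1, h.2]
      simp [this]
    have h1 : writesL (setCell bd p.1 p.2 v) (qw :: pvs)
        = writesL (setCell (setCell bd p.1 p.2 v) qw.1.1 qw.1.2 qw.2) pvs := rfl
    rw [h1, setCell_comm bd hp.1 hp.2 hq.1 hq.2 hne,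
      ih _ (fun q hq' => hnn q (List.mem_cons_of_mem _ hq')) (by simp at hnm ⊢; exact hnm.2)]
    rfl

lemma writesL_rotate (bd : List (List Int)) (p : Int × Int) (v : Int)
    (pvs : List ((Int × Int) × Int)) (hp : 0 ≤ p.1 ∧ 0 ≤ p.2)
    (hnn : ∀ q ∈ pvs, 0 ≤ q.1.1 ∧ 0 ≤ q.1.2) (hnm : p ∉ pvs.map (·.1)) :
    writesL bd ((p, v) :: pvs) = writesL bd (pvs ++ [(p, v)]) := by
  have h1 : writesL bd ((p, v) :: pvs) = writesL (setCell bd p.1 p.2 v) pvs := rfl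
  rw [h1, writesL_setCell_comm pvs bd v hp hnn hnm]
  show _ = List.foldl _ bd (pvs ++ [(p, v)])
  rw [List.foldl_append]
  rfl

-- the border as B walks it (borderC), the same cycle less the corner (cornerT),
-- and the border as A's four carry loops walk it (borderL)
def cornerT (r1 c1 r2 c2 : Int) : List (Int × Int) :=
  (PySem.List.pyRange (c1 + 1) c2 1).map (fun c => (r1, c))
  ++ (PySem.List.pyRange r1 r2 1).map (fun r => (r, c2))
  ++ (PySem.List.pyRange c2 c1 (-1)).map (fun c => (r2, c))
  ++ (PySem.List.pyRange r2 r1 (-1)).map (fun r => (r, c1))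

def borderC (r1 c1 r2 c2 : Int) : List (Int × Int) :=
  (PySem.List.pyRange c1 c2 1).map (fun c => (r1, c))
  ++ (PySem.List.pyRange r1 r2 1).map (fun r => (r, c2))
  ++ (PySem.List.pyRange c2 c1 (-1)).map (fun c => (r2, c))
  ++ (PySem.List.pyRange r2 r1 (-1)).map (fun r => (r, c1))

def borderL (r1 c1 r2 c2 : Int) : List (Int × Int) :=
  (PySem.List.pyRange (c1 + 1) (c2 + 1) 1).map (fun i => (r1, i))
  ++ (PySem.List.pyRange (r1 + 1) (r2 + 1) 1).map (fun i => (i, c2))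
  ++ (PySem.List.pyRange (c2 - 1) (c1 - 1) (-1)).map (fun i => (r2, i))
  ++ (PySem.List.pyRange (r2 - 1) (r1 - 1) (-1)).map (fun i => (i, c1))

lemma borderC_eq_cons (r1 c1 r2 c2 : Int) (h4 : c1 < c2) :
    borderC r1 c1 r2 c2 = (r1, c1) :: cornerT r1 c1 r2 c2 := by
  rw [borderC, cornerT, PySem.List.pyRange_one_cons h4]
  simp

lemma rev_neg_range (a b : Int) : PySem.List.pyRange (b - 1) (a - 1) (-1)
    = (PySem.List.pyRange a b 1).reverse := by
  have := PySem.List.pyRange_neg_one_eq_reverse (b - 1) (a - 1)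
  simpa using this

lemma neg_range_snoc (a b : Int) (h : a < b) :
    PySem.List.pyRange (b - 1) (a - 1) (-1) = PySem.List.pyRange (b - 1) a (-1) ++ [a] := by
  rw [rev_neg_range, PySem.List.pyRange_one_cons h, List.reverse_cons]
  congr 1
  have := PySem.List.pyRange_neg_one_eq_reverse (b - 1) a
  simpa using this.symm

lemma borderL_eq (r1 c1 r2 c2 : Int) (h2 : r1 < r2) (h4 : c1 < c2) :
    borderL r1 c1 r2 c2 = cornerT r1 c1 r2 c2 ++ [(r1, c1)] := by
  rw [borderL, cornerT]
  have t1 : PySem.List.pyRange (c1 + 1) (c2 + 1) 1 = PySem.List.pyRange (c1 + 1) c2 1 ++ [c2] :=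
    PySem.List.pyRange_one_succ_right (by omega)
  have t2 : PySem.List.pyRange (r1 + 1) (r2 + 1) 1 = PySem.List.pyRange (r1 + 1) r2 1 ++ [r2] :=
    PySem.List.pyRange_one_succ_right (by omega)
  have t3 := neg_range_snoc c1 c2 h4
  have t4 := neg_range_snoc r1 r2 h2
  have t5 : PySem.List.pyRange r1 r2 1 = r1 :: PySem.List.pyRange (r1 + 1) r2 1 :=
    PySem.List.pyRange_one_cons h2
  have t6 : PySem.List.pyRange c2 c1 (-1) = c2 :: PySem.List.pyRange (c2 - 1) c1 (-1) :=
    PySem.List.pyRange_neg_one_cons h4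
  have t7 : PySem.List.pyRange r2 r1 (-1) = r2 :: PySem.List.pyRange (r2 - 1) r1 (-1) :=
    PySem.List.pyRange_neg_one_cons h2
  rw [t1, t2, t3, t4, t5, t6, t7]
  simp

lemma nonneg_borderC (r1 c1 r2 c2 : Int) (h1 : 0 ≤ r1) (h2 : r1 < r2) (h3 : 0 ≤ c1)
    (h4 : c1 < c2) : ∀ p ∈ borderC r1 c1 r2 c2, 0 ≤ p.1 ∧ 0 ≤ p.2 := by
  intro p hp
  simp only [borderC, List.mem_append, List.mem_map, PySem.List.mem_pyRange_one,
    PySem.List.mem_pyRange_neg_one] at hp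
  rcases hp with ((⟨c, hc, rfl⟩ | ⟨r, hr, rfl⟩) | ⟨c, hc, rfl⟩) | ⟨r, hr, rfl⟩ <;>
    dsimp only <;> exact ⟨by omega, by omega⟩

lemma nodup_borderC (r1 c1 r2 c2 : Int) (h2 : r1 < r2) (h4 : c1 < c2) :
    (borderC r1 c1 r2 c2).Nodup := by
  have hrev3 : PySem.List.pyRange c2 c1 (-1) = (PySem.List.pyRange (c1 + 1) (c2 + 1) 1).reverse := by
    have := rev_neg_range (c1 + 1) (c2 + 1); simpa using this
  have hrev4 : PySem.List.pyRange r2 r1 (-1) = (PySem.List.pyRange (r1 + 1) (r2 + 1) 1).reverse := by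
    have := rev_neg_range (r1 + 1) (r2 + 1); simpa using this
  rw [borderC, hrev3, hrev4]
  have inj1 : Function.Injective (fun c : Int => ((r1, c) : Int × Int)) := by
    intro a b h; simpa using h
  have inj2 : Function.Injective (fun r : Int => ((r, c2) : Int × Int)) := by
    intro a b h; simpa using h
  have inj3 : Function.Injective (fun c : Int => ((r2, c) : Int × Int)) := by
    intro a b h; simpa using h
  have inj4 : Function.Injective (fun r : Int => ((r, c1) : Int × Int)) := by
    intro a b h; simpa using h
  refine List.Nodup.append (List.Nodup.append (List.Nodup.append ?_ ?_ ?_) ?_ ?_) ?_ ?_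
  · exact List.Nodup.map inj1 (PySem.List.nodup_pyRange_one _ _)
  · exact List.Nodup.map inj2 (PySem.List.nodup_pyRange_one _ _)
  · intro p hp hq
    simp only [List.mem_map, PySem.List.mem_pyRange_one] at hp hq
    obtain ⟨c, hc, rfl⟩ := hp
    obtain ⟨r, hr, he⟩ := hq
    simp only [Prod.mk.injEq] at he
    omega
  · exact List.Nodup.map inj3 (List.nodup_reverse.mpr (PySem.List.nodup_pyRange_one _ _))
  · intro p hp hq
    simp only [List.mem_append, List.mem_map, List.mem_reverse,
      PySem.List.mem_pyRange_one] at hp hq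
    obtain ⟨c, hc, he⟩ := hq
    rcases hp with ⟨c', hc', rfl⟩ | ⟨r, hr, rfl⟩ <;> simp only [Prod.mk.injEq] at he <;> omega
  · exact List.Nodup.map inj4 (List.nodup_reverse.mpr (PySem.List.nodup_pyRange_one _ _))
  · intro p hp hq
    simp only [List.mem_append, List.mem_map, List.mem_reverse,
      PySem.List.mem_pyRange_one] at hp hq
    obtain ⟨r, hr, he⟩ := hq
    rcases hp with (⟨c, hc, rfl⟩ | ⟨r', hr', rfl⟩) | ⟨c, hc, rfl⟩ <;>
      simp only [Prod.mk.injEq] at he <;> omega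

lemma query_eq (bd : List (List Int)) (r1 c1 r2 c2 : Int)
    (h1 : 0 ≤ r1) (h2 : r1 < r2) (h3 : 0 ≤ c1) (h4 : c1 < c2) :
    (carryA (bd, getCell bd r1 c1, getCell bd r1 c1) (borderL r1 c1 r2 c2)).1
        = writesL bd ((borderC r1 c1 r2 c2).zip
          (PySem.List.pyGetD (readsL bd (borderC r1 c1 r2 c2)) (-1) 0
            :: PySem.List.slice (readsL bd (borderC r1 c1 r2 c2)) none (some (-1))))
      ∧ (carryA (bd, getCell bd r1 c1, getCell bd r1 c1) (borderL r1 c1 r2 c2)).2.2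
        = (PySem.List.min? (readsL bd (borderC r1 c1 r2 c2)) (fun x => x)).getD 0 := by
  have hC := borderC_eq_cons r1 c1 r2 c2 h4
  have hL := borderL_eq r1 c1 r2 c2 h2 h4
  have hndC := nodup_borderC r1 c1 r2 c2 h2 h4
  have hnnC := nonneg_borderC r1 c1 r2 c2 h1 h2 h3 h4
  have hperm : (borderL r1 c1 r2 c2).Perm (borderC r1 c1 r2 c2) := by
    rw [hL, hC]; exact List.perm_append_singleton _ _
  have hndL : (borderL r1 c1 r2 c2).Nodup := hperm.symm.nodup hndC
  have hnnL : ∀ p ∈ borderL r1 c1 r2 c2, 0 ≤ p.1 ∧ 0 ≤ p.2 := by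
    intro p hp; exact hnnC p (hperm.mem_iff.mp hp)
  have hcornerT : ((r1, c1) : Int × Int) ∉ cornerT r1 c1 r2 c2 := by
    have := hC ▸ hndC
    exact (List.nodup_cons.mp this).1
  have hnnT : ∀ p ∈ cornerT r1 c1 r2 c2, 0 ≤ p.1 ∧ 0 ≤ p.2 := by
    intro p hp; exact hnnC p (by rw [hC]; exact List.mem_cons_of_mem _ hp)
  -- T is nonempty
  have hmemT : ((r1, c2) : Int × Int) ∈ cornerT r1 c1 r2 c2 := by
    simp only [cornerT, List.mem_append, List.mem_map, PySem.List.mem_pyRange_one]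
    exact Or.inl (Or.inl (Or.inr ⟨r1, ⟨le_refl _, h2⟩, rfl⟩))
  have hTne : cornerT r1 c1 r2 c2 ≠ [] := List.ne_nil_of_mem hmemT
  set v0 := getCell bd r1 c1 with hv0
  set RT := readsL bd (cornerT r1 c1 r2 c2) with hRTdef
  have hRTne : RT ≠ [] := by
    rw [hRTdef, readsL]; simpa using hTne
  set w := RT.getLast hRTne with hw
  set W := RT.dropLast with hW
  have hRT : RT = W ++ [w] := (List.dropLast_append_getLast hRTne).symm
  have hlenTW : (cornerT r1 c1 r2 c2).length = (v0 :: W).length := by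
    have l1 : RT.length = (cornerT r1 c1 r2 c2).length := by rw [hRTdef, readsL]; simp
    have l2 : RT.length = W.length + 1 := by rw [hRT]; simp
    simp [← l1, l2]
  -- reads along the two walks
  have hreadL : readsL bd (borderL r1 c1 r2 c2) = RT ++ [v0] := by
    rw [hL, readsL, List.map_append, hRTdef, readsL, hv0]; rfl
  have hvals : readsL bd (borderC r1 c1 r2 c2) = (v0 :: W) ++ [w] := by
    rw [hC, readsL, List.map_cons, ← hv0, ← readsL, ← hRTdef, hRT]; rfl
  -- evaluate A by carry_spec
  rw [carry_spec _ _ _ _ hndL hnnL, hreadL]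
  constructor
  · -- boards agree
    rw [hvals, PySem.List.pyGetD_neg_one_append_singleton, PySem.List.slice_to_neg_one,
      List.dropLast_concat, hL]
    have hzipA : (cornerT r1 c1 r2 c2 ++ [(r1, c1)]).zip (v0 :: (RT ++ [v0]))
        = (cornerT r1 c1 r2 c2).zip (v0 :: W) ++ [((r1, c1), w)] := by
      have : v0 :: (RT ++ [v0]) = (v0 :: W) ++ ([w] ++ [v0]) := by rw [hRT]; simp
      rw [this, List.zip_append hlenTW]
      rfl
    have hzipB : ((r1, c1) :: cornerT r1 c1 r2 c2).zip (w :: v0 :: W)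
        = ((r1, c1), w) :: (cornerT r1 c1 r2 c2).zip (v0 :: W) := rfl
    rw [hzipA, hC, hzipB, writesL_rotate bd (r1, c1) w _ ⟨h1, h3⟩ ?_ ?_]
    · intro q hq
      obtain ⟨⟨a, b⟩, v⟩ := q
      exact hnnT _ (List.of_mem_zip hq).1
    · rw [List.map_fst_zip (by omega)]
      exact hcornerT
  · -- minima agree
    rw [hvals]
    have : (v0 :: W) ++ [w] = v0 :: RT := by simp [hRT]
    rw [this, PySem.List.min?_id_cons, Option.getD_some, List.foldl_append]
    simp only [List.foldl_cons, List.foldl_nil]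
    exact min_eq_left (PySem.List.foldl_min_le RT v0).1


lemma carryA_loops (t0 : List (List Int) × Int × Int) (r1 c1 r2 c2 : Int) :
    (PySem.List.pyRange (r2 - 1) (r1 - 1) (-1)).foldl (fun t i => qstep t i c1)
      ((PySem.List.pyRange (c2 - 1) (c1 - 1) (-1)).foldl (fun t i => qstep t r2 i)
        ((PySem.List.pyRange (r1 + 1) (r2 + 1) 1).foldl (fun t i => qstep t i c2)
          ((PySem.List.pyRange (c1 + 1) (c2 + 1) 1).foldl (fun t i => qstep t r1 i) t0)))
    = carryA t0 (borderL r1 c1 r2 c2) := by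
  simp [carryA, borderL, List.foldl_append, List.foldl_map]

-- ===== VERDICT (by name: the statement is the Claim_ definition above) =====
theorem solution_spec : Claim_equal_solution := by
  unfold Claim_equal_solution
  intro rows columns queries hdom hpre
  unfold Spec_solution solution solution_alt
  apply congrArg Prod.snd
  apply PySem.List.foldl_congr_mem
  intro s q hq
  obtain ⟨hlen, hx1, hx12, hx2r, hy1, hy12, hy2c⟩ := hpre q hq
  have e0 : PySem.List.pyGetD q 0 0 = q.getD 0 0 := by
    rw [PySem.List.pyGetD_of_nonneg _ _ (by norm_num)]
    rfl
  have e1 : PySem.List.pyGetD q 1 0 = q.getD 1 0 := by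
    rw [PySem.List.pyGetD_of_nonneg _ _ (by norm_num)]
    rfl
  have e2 : PySem.List.pyGetD q 2 0 = q.getD 2 0 := by
    rw [PySem.List.pyGetD_of_nonneg _ _ (by norm_num)]
    rfl
  have e3 : PySem.List.pyGetD q 3 0 = q.getD 3 0 := by
    rw [PySem.List.pyGetD_of_nonneg _ _ (by norm_num)]
    rfl
  simp only [e0, e1, e2, e3, carryA_loops]
  have hq1 : 0 ≤ q.getD 0 0 - 1 := by omega
  have hq2 : q.getD 0 0 - 1 < q.getD 2 0 - 1 := by omega
  have hq3 : 0 ≤ q.getD 1 0 - 1 := by omega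
  have hq4 : q.getD 1 0 - 1 < q.getD 3 0 - 1 := by omega
  obtain ⟨hb, hm⟩ := query_eq s.1 (q.getD 0 0 - 1) (q.getD 1 0 - 1) (q.getD 2 0 - 1)
    (q.getD 3 0 - 1) hq1 hq2 hq3 hq4
  refine Prod.ext ?_ ?_
  · exact hb
  · rw [hm]
    rfl
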